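-- pv_equiv track=rewrite | github.com/KentaMS/Projet-RCR---Argumentation-2023 | program.py | verify_stable_extension
-- ===== SOURCE A (Python) =====
-- def is_conflict_free(arg_framework: dict, arg_set: set) -> bool:
--     """
--     Checks if the provided argument set is conflict-free in the argumentation framework (AF), or not.
--     """
--     # Return False if any argument from the set attacks another one from the set, and True otherwise
--     for current_arg in arg_set:
--         for attacked_arg in arg_framework[current_arg]:
--             if attacked_arg in arg_set: return False
--     return True
--
-- def verify_stable_extension(arg_framework: dict, arg_set: set) -> bool:
--     """
--     Determine whether the provided argument set is a stable extension of the argumentation framework, or not.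
--     """
--     # The set has to be conflict-free to be a stable extension.
--     if not is_conflict_free(arg_framework, arg_set): return False
--
--     # Create a set of all arguments of the framework that are not in the provided argument set.
--     other_args = {argument for argument in arg_framework.keys() if argument not in arg_set}
--
--     # The argument set is a stable extension if all other arguments of the framework are attacked by the provided arguments.
--     # arg_set is stable if all arguments in other_args are attacked.
--     for current_arg in arg_set:
--         for attacked_arg in arg_framework[current_arg]:
--             if attacked_arg in other_args:
--                 other_args.remove(attacked_arg)
--
--     if len(other_args) == 0: # All args were attacked, so arg_set is stable.
--         return True
--     return False
-- ===== SOURCE B (Python) =====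
-- def verify_stable_extension(arg_framework: dict, arg_set: set) -> bool:
--     """
--     A set is a stable extension iff every argument of the framework is in good standing:
--     a member must attack no member, and a non-member must be attacked by some member.
--     Judged key by key with a direct attacker search; no auxiliary set is ever built.
--     """
--     def in_good_standing(k):
--         if k in arg_set:
--             return not any(t in arg_set for t in arg_framework[k])
--         return any(k in arg_framework[a] for a in arg_set)
--     return all(in_good_standing(k) for k in arg_framework)
-- ===== Notes on version B (the rewrite author's own statement) =====
-- stated objective: alternative
-- what changed: Replaces A's staged scheme (conflict-free pass, build the complement set, remove attacked elements, test emptiness) by a single universally quantified per-key judgement: every framework key is either a member attacking no member or a non-member for which an attacker is searched directly in arg_set; no attacked/complement set is materialised.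
-- outside the precondition, e.g. on verify_stable_extension({'x': [], '': ['']}, {'', 'b'}): A returns False, B raises KeyError; on verify_stable_extension({'a': ['c']}, {'b'}): A raises KeyError, B raises KeyError
import Mathlib
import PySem

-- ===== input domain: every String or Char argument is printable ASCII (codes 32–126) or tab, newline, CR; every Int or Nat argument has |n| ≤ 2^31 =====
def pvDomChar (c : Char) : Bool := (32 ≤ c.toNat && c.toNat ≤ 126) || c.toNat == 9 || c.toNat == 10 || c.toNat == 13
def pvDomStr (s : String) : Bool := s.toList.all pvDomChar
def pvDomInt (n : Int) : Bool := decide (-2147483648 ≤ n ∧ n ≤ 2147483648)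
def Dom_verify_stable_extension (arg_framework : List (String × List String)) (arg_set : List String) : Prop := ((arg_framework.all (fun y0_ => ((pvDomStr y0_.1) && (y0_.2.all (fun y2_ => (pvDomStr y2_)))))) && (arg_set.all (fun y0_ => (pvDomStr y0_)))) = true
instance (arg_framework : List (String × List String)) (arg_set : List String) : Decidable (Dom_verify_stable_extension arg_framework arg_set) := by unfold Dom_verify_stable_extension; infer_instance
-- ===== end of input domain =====

-- B replaces A's staged scheme (conflict-free pass, complement set, removal loop, emptiness
-- test) by a single per-key judgement with a direct attacker search; same return value,
-- no speed claim.

-- dict lookup arg_framework[x] (exact inside Pre_, where every looked-up key is present)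
def fwGet (arg_framework : List (String × List String)) (x : String) : List String :=
  PySem.Dict.getD (PySem.Dict.mk arg_framework) x []

-- ===== PORT A =====
def is_conflict_free (arg_framework : List (String × List String)) (arg_set : List String) : Bool :=
  -- for current_arg in arg_set: for attacked_arg in fw[current_arg]: if attacked_arg in arg_set: return False
  !(arg_set.any (fun current_arg =>
      (fwGet arg_framework current_arg).any (fun attacked_arg => arg_set.contains attacked_arg)))

def verify_stable_extension (arg_framework : List (String × List String)) (arg_set : List String) : Bool :=
  if !(is_conflict_free arg_framework arg_set) then false
  else
    -- other_args = {argument for argument in arg_framework.keys() if argument not in arg_set},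
    -- then: for current_arg in arg_set: for attacked_arg in fw[current_arg]:
    --         if attacked_arg in other_args: other_args.remove(attacked_arg)
    -- finally len(other_args) == 0
    ((arg_set.foldl (fun o current_arg =>
        (fwGet arg_framework current_arg).foldl
          (fun o attacked_arg => if o.contains attacked_arg then o.erase attacked_arg else o) o)
      (PySem.Set.ofList ((arg_framework.map Prod.fst).filter
        (fun argument => !(arg_set.contains argument))))).length == 0)

-- ===== PORT B =====
-- in_good_standing(k): a member must attack no member, a non-member must have an attacker in arg_set
def in_good_standing (arg_framework : List (String × List String)) (arg_set : List String) (k : String) : Bool :=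
  if arg_set.contains k then
    !((fwGet arg_framework k).any (fun t => arg_set.contains t))
  else
    arg_set.any (fun a => (fwGet arg_framework a).contains k)

def verify_stable_extension_alt (arg_framework : List (String × List String)) (arg_set : List String) : Bool :=
  -- all(in_good_standing(k) for k in arg_framework)
  (arg_framework.map Prod.fst).all (in_good_standing arg_framework arg_set)

-- ===== PRECONDITION & SPEC =====
-- Pre_ requires every member of arg_set to be a key of arg_framework: on other inputs both
-- programs look up a missing key and raise KeyError (A may instead accidentally return
-- False first, depending on the set iteration order).
def Pre_verify_stable_extension (arg_framework : List (String × List String)) (arg_set : List String) : Prop :=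
  ∀ x ∈ arg_set, x ∈ arg_framework.map Prod.fst
instance (arg_framework : List (String × List String)) (arg_set : List String) : Decidable (Pre_verify_stable_extension arg_framework arg_set) := by unfold Pre_verify_stable_extension; infer_instance

def pvWitness_verify_stable_extension : (List (String × List String)) × List String :=
  ([("a", ["b"]), ("b", [])], ["a"])

def Spec_verify_stable_extension (arg_framework : List (String × List String)) (arg_set : List String) (out : Bool) : Prop := out = verify_stable_extension_alt arg_framework arg_set
instance (arg_framework : List (String × List String)) (arg_set : List String) (out : Bool) : Decidable (Spec_verify_stable_extension arg_framework arg_set out) := by unfold Spec_verify_stable_extension; infer_instance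

-- ===== CLAIM (what is proved, stated in full; the proofs are below) =====
def Claim_equal_verify_stable_extension : Prop := ∀ (arg_framework : List (String × List String)) (arg_set : List String), Dom_verify_stable_extension arg_framework arg_set → Pre_verify_stable_extension arg_framework arg_set → Spec_verify_stable_extension arg_framework arg_set (verify_stable_extension arg_framework arg_set)

-- ===== LEMMAS AND PROOFS =====

-- in_good_standing unfolded on the two membership cases
theorem igs_mem (fw : List (String × List String)) (s : List String) (k : String) (h : k ∈ s) :
    in_good_standing fw s k = !((fwGet fw k).any (fun t => s.contains t)) := by
  simp [in_good_standing, h]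

theorem igs_not_mem (fw : List (String × List String)) (s : List String) (k : String) (h : ¬ k ∈ s) :
    in_good_standing fw s k = s.any (fun a => (fwGet fw a).contains k) := by
  simp [in_good_standing, h]

-- The guarded-remove fold deletes from a duplicate-free set exactly the members of L.
theorem eraseFold_eq_filter (L : List String) :
    ∀ (o : PySem.Set String), o.Nodup →
      L.foldl (fun o t => if o.contains t then o.erase t else o) o
        = o.filter (fun x => !(L.contains x)) := by
  induction L with
  | nil => intro o _; simp
  | cons t L ih =>
    intro o ho
    have hstep : (if o.contains t then o.erase t else o) = o.erase t := by
      by_cases h : t ∈ o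
      · simp [h]
      · simp [h, List.erase_of_not_mem h]
    have herase : o.erase t = o.filter (fun x => !(x == t)) := by
      simpa using ho.erase_eq_filter t
    rw [List.foldl_cons, hstep, ih _ (ho.erase t), herase, List.filter_filter]
    apply List.filter_congr
    intro x _
    by_cases hx : x = t <;> simp [hx]

-- Collapse A's nested removal loop into one fold over the flattened attack lists.
theorem foldl_foldl_eq_flatMap {α β : Type} (g : α → List β) (step : PySem.Set String → β → PySem.Set String) :
    ∀ (l : List α) (o : PySem.Set String),
      l.foldl (fun o a => (g a).foldl step o) o = (l.flatMap g).foldl step o := by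
  intro l
  induction l with
  | nil => intro o; simp
  | cons a l ih => intro o; simp [List.flatMap_cons, List.foldl_append, ih]

-- ===== VERDICT (by name: the statement is the Claim_ definition above) =====
theorem verify_stable_extension_spec : Claim_equal_verify_stable_extension := by
  intro fw s _ hpre
  unfold Spec_verify_stable_extension
  by_cases hc : s.any (fun a => (fwGet fw a).any (fun t => s.contains t)) = true
  · -- a conflict: both sides return false
    obtain ⟨a, ha, hat⟩ := List.any_eq_true.mp hc
    have hicf : is_conflict_free fw s = false := by
      unfold is_conflict_free; rw [hc]; rfl
    have hA : verify_stable_extension fw s = false := by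
      unfold verify_stable_extension; rw [hicf, if_pos (by decide)]
    have hB : verify_stable_extension_alt fw s = false := by
      unfold verify_stable_extension_alt
      rw [List.all_eq_false]
      refine ⟨a, hpre a ha, ?_⟩
      rw [igs_mem fw s a ha, hat]
      simp
    rw [hA, hB]
  · -- conflict-free: both sides test that every non-member key has an attacker
    have hcf : s.any (fun a => (fwGet fw a).any (fun t => s.contains t)) = false :=
      Bool.eq_false_iff.mpr hc
    have hicf : is_conflict_free fw s = true := by
      unfold is_conflict_free; rw [hcf]; rfl
    have hno : ∀ a ∈ s, ((fwGet fw a).any (fun t => s.contains t)) = false := by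
      intro a ha
      exact Bool.eq_false_iff.mpr (fun h => hc (List.any_eq_true.mpr ⟨a, ha, h⟩))
    have hother0 : (PySem.Set.ofList ((fw.map Prod.fst).filter
        (fun argument => !(s.contains argument)))).Nodup :=
      PySem.Set.nodup_ofList _
    unfold verify_stable_extension verify_stable_extension_alt
    rw [hicf, if_neg (by decide),
        foldl_foldl_eq_flatMap (fun a => fwGet fw a)
          (fun (o : PySem.Set String) (t : String) => if o.contains t then o.erase t else o) s,
        eraseFold_eq_filter _ _ hother0]
    rw [Bool.eq_iff_iff]
    constructor
    · -- A's remaining-set is empty → every key is in good standing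
      intro h
      have hempty : ((PySem.Set.ofList ((fw.map Prod.fst).filter
          (fun argument => !(s.contains argument)))).filter
          (fun x => !((s.flatMap (fun a => fwGet fw a)).contains x))) = [] :=
        List.length_eq_zero_iff.mp (by simpa using h)
      rw [List.all_eq_true]
      intro k hk
      by_cases hks : k ∈ s
      · rw [igs_mem fw s k hks, hno k hks]
        rfl
      · have hmem := List.filter_eq_nil_iff.mp hempty k
          (by rw [PySem.Set.mem_ofList, List.mem_filter]; exact ⟨hk, by simp [hks]⟩)
        have hatt : k ∈ s.flatMap (fun a => fwGet fw a) := by simpa using hmem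
        obtain ⟨a, ha, hka⟩ := List.mem_flatMap.mp hatt
        rw [igs_not_mem fw s k hks]
        exact List.any_eq_true.mpr ⟨a, ha, by simpa using hka⟩
    · -- every key in good standing → A's remaining-set is empty
      intro h
      have hempty : ((PySem.Set.ofList ((fw.map Prod.fst).filter
          (fun argument => !(s.contains argument)))).filter
          (fun x => !((s.flatMap (fun a => fwGet fw a)).contains x))) = [] := by
        rw [List.filter_eq_nil_iff]
        intro x hx
        rw [PySem.Set.mem_ofList, List.mem_filter] at hx
        obtain ⟨hxk, hxs⟩ := hx
        have hxs' : ¬ x ∈ s := by simpa using hxs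
        have hg := List.all_eq_true.mp h x hxk
        rw [igs_not_mem fw s x hxs'] at hg
        obtain ⟨a, ha, hxa⟩ := List.any_eq_true.mp hg
        have : x ∈ s.flatMap (fun a => fwGet fw a) :=
          List.mem_flatMap.mpr ⟨a, ha, by simpa using hxa⟩
        simp [this]
      rw [hempty]; rfl
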